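-- pv_equiv track=rewrite | github.com/RikudoSennin521/Fusion-Tree | fusiontree.py | getConst
-- ===== SOURCE A (Python) =====
-- def getConst(b_bits):
--     r = len(b_bits)
--     m_bits = [0 for i in range(r)]
--     for t in range(r):
--         mt = 0
--         flag = True
--         while flag:
--             flag = False
--             for i in range(r):
--                 if flag:
--                     break
--                 for j in range(r):
--                     if flag:
--                         break
--                     for k in range(t):
--                         if mt == b_bits[i] - b_bits[j] + m_bits[k]:
--                             flag = True
--                             break
--             if flag == True:
--                 mt += 1
--         m_bits[t] = mt
--
--     m = 0
--     for i in m_bits: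
--         m |= 1 << i
--     return m_bits, m
-- ===== SOURCE B (Python) =====
-- def getConst(b_bits):
--     r = len(b_bits)
--     diffs = {x - y for x in b_bits for y in b_bits}
--     forbidden = set()
--     m_bits = []
--     m = 0
--     for _ in range(r):
--         mt = 0
--         while mt in forbidden:
--             mt += 1
--         m_bits.append(mt)
--         for d in diffs:
--             forbidden.add(d + mt)
--         m |= 1 << mt
--     return m_bits, m
-- ===== Notes on version B (the rewrite author's own statement) =====
-- stated objective: faster
-- what changed: Instead of re-scanning all (i,j,k) triples for every candidate mt, B precomputes the set of pairwise differences once and maintains an incrementally grown hash set of forbidden values, so each candidate costs one O(1) membership test.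
import Mathlib
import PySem

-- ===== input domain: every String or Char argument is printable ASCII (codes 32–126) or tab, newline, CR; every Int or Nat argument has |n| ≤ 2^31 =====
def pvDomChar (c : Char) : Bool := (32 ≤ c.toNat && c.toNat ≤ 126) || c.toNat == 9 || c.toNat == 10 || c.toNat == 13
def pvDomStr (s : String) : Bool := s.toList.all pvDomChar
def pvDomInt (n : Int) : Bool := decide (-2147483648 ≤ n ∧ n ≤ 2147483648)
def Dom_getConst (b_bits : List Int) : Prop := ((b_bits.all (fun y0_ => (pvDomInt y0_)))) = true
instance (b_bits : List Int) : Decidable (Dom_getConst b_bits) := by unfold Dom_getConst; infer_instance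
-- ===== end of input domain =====

-- B replaces A's triple-nested rescan per candidate with a precomputed difference set and an
-- incrementally maintained forbidden set; a timing run measured it faster (asymptotic).

-- ===== PORT A =====
-- 'm |= 1 << i' (i is always nonnegative here, so .toNat is exact)
def orBit (m i : Int) : Int := PySem.Int.bor m ((1 : Int) <<< i.toNat)

-- all candidate collision values b[i]-b[j]+m_bits[k] (used only for the termination measure of the while loop)
def pvValsA (b ms : List Int) (t : Nat) : List Int :=
  (List.range b.length).flatMap fun i =>
    (List.range b.length).flatMap fun j =>
      (List.range t).map fun k => b.getD i 0 - b.getD j 0 + ms.getD k 0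

-- the net effect of A's flag/break triple loop for one candidate mt
def collideA (b ms : List Int) (t : Nat) (mt : Int) : Bool :=
  (List.range b.length).any fun i =>
    (List.range b.length).any fun j =>
      (List.range t).any fun k =>
        mt == b.getD i 0 - b.getD j 0 + ms.getD k 0

theorem collideA_mem {b ms : List Int} {t : Nat} {mt : Int}
    (h : collideA b ms t mt = true) : mt ∈ pvValsA b ms t := by
  simp only [collideA, List.any_eq_true, beq_iff_eq] at h
  simp only [pvValsA, List.mem_flatMap, List.mem_map]
  obtain ⟨i, hi, j, hj, k, hk, he⟩ := h
  exact ⟨i, hi, j, hj, k, hk, he.symm⟩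

theorem le_foldr_max {x : Int} : ∀ {l : List Int}, x ∈ l → x ≤ l.foldr max 0
  | a :: l, h => by
    rcases List.mem_cons.mp h with h | h
    · subst h; exact le_max_left _ _
    · exact le_trans (le_foldr_max h) (le_max_right _ _)

-- A's 'while flag: … mt += 1'
def whileA (b ms : List Int) (t : Nat) (mt : Int) : Int :=
  if collideA b ms t mt then whileA b ms t (mt + 1) else mt
termination_by ((pvValsA b ms t).foldr max 0 + 1 - mt).toNat
decreasing_by
  have h1 : mt ≤ (pvValsA b ms t).foldr max 0 := le_foldr_max (collideA_mem (by assumption))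
  omega

-- A's 'for t in range(r)' loop: ms is the prefix m_bits[0:t] already assigned (only it is ever read)
def loopA (b : List Int) : Nat → List Int → List Int
  | 0, ms => ms
  | n + 1, ms => loopA b n (ms ++ [whileA b ms ms.length 0])

def getConst (b_bits : List Int) : List Int × Int :=
  let m_bits := loopA b_bits b_bits.length []
  (m_bits, m_bits.foldl (fun m i => orBit m i) 0)

-- ===== PORT B =====
def diffsB (b : List Int) : PySem.Set Int :=
  PySem.Set.ofList (b.flatMap fun x => b.map fun y => x - y)

-- B's 'while mt in forbidden: mt += 1'
def whileB (forb : PySem.Set Int) (mt : Int) : Int :=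
  if forb.contains mt then whileB forb (mt + 1) else mt
termination_by (forb.foldr max 0 + 1 - mt).toNat
decreasing_by
  have h1 : mt ≤ forb.foldr max 0 :=
    le_foldr_max ((PySem.Set.contains_iff _ _).mp (by assumption))
  omega

-- B's main loop, carrying (m_bits, forbidden, m)
def loopB (dif : PySem.Set Int) : Nat → List Int → PySem.Set Int → Int → List Int × Int
  | 0, ms, _, m => (ms, m)
  | n + 1, ms, forb, m =>
    let mt := whileB forb 0
    loopB dif n (ms ++ [mt]) (dif.foldl (fun f d => f.add (d + mt)) forb)
      (orBit m mt)

def getConst_alt (b_bits : List Int) : List Int × Int :=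
  loopB (diffsB b_bits) b_bits.length [] PySem.Set.empty 0

-- ===== PRECONDITION & SPEC =====
def Spec_getConst (b_bits : List Int) (out : List Int × Int) : Prop := out = getConst_alt b_bits
instance (b_bits : List Int) (out : List Int × Int) : Decidable (Spec_getConst b_bits out) := by unfold Spec_getConst; infer_instance

-- ===== CLAIM (what is proved, stated in full; the proofs are below) =====
def Claim_equal_getConst : Prop := ∀ (b_bits : List Int), Dom_getConst b_bits → Spec_getConst b_bits (getConst b_bits)

-- ===== LEMMAS AND PROOFS =====

-- the forbidden-set invariant: forb holds exactly the values b[i]-b[j]+ms[k]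
def ForbInv (b ms : List Int) (forb : PySem.Set Int) : Prop :=
  ∀ x : Int, x ∈ forb ↔ ∃ p ∈ b, ∃ q ∈ b, ∃ k < ms.length, x = p - q + ms.getD k 0

theorem collideA_iff (b ms : List Int) (mt : Int) :
    collideA b ms ms.length mt = true ↔
      ∃ p ∈ b, ∃ q ∈ b, ∃ k < ms.length, mt = p - q + ms.getD k 0 := by
  simp only [collideA, List.any_eq_true, List.mem_range, beq_iff_eq]
  constructor
  · rintro ⟨i, hi, j, hj, k, hk, he⟩
    rw [List.getD_eq_getElem _ _ hi, List.getD_eq_getElem _ _ hj] at he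
    exact ⟨b[i], List.getElem_mem hi, b[j], List.getElem_mem hj, k, hk, he⟩
  · rintro ⟨p, hp, q, hq, k, hk, he⟩
    obtain ⟨i, hi, rfl⟩ := List.mem_iff_getElem.mp hp
    obtain ⟨j, hj, rfl⟩ := List.mem_iff_getElem.mp hq
    refine ⟨i, hi, j, hj, k, hk, ?_⟩
    rw [List.getD_eq_getElem _ _ hi, List.getD_eq_getElem _ _ hj]
    exact he

theorem whileAB_eq (b ms : List Int) (forb : PySem.Set Int) (hI : ForbInv b ms forb) :
    ∀ mt : Int, whileA b ms ms.length mt = whileB forb mt := by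
  intro mt
  fun_induction whileA b ms ms.length mt with
  | case1 mt hc ih =>
    rw [whileB, if_pos, ih]
    exact (PySem.Set.contains_iff _ _).mpr ((hI mt).mpr ((collideA_iff b ms mt).mp hc))
  | case2 mt hc =>
    rw [whileB, if_neg]
    intro hcon
    exact hc ((collideA_iff b ms mt).mpr ((hI mt).mp ((PySem.Set.contains_iff _ _).mp hcon)))

theorem mem_diffsB (b : List Int) (d : Int) :
    d ∈ diffsB b ↔ ∃ p ∈ b, ∃ q ∈ b, d = p - q := by
  simp only [diffsB, PySem.Set.mem_ofList, List.mem_flatMap, List.mem_map]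
  constructor
  · rintro ⟨p, hp, q, hq, rfl⟩; exact ⟨p, hp, q, hq, rfl⟩
  · rintro ⟨p, hp, q, hq, rfl⟩; exact ⟨p, hp, q, hq, rfl⟩

theorem ForbInv_step (b ms : List Int) (forb : PySem.Set Int) (mt : Int) (hI : ForbInv b ms forb) :
    ForbInv b (ms ++ [mt]) ((diffsB b).foldl (fun f d => f.add (d + mt)) forb) := by
  intro x
  rw [PySem.Set.mem_foldl_add _ _ _ _]
  constructor
  · rintro (hx | ⟨d, hd, rfl⟩)
    · obtain ⟨p, hp, q, hq, k, hk, he⟩ := (hI x).mp hx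
      refine ⟨p, hp, q, hq, k, by simp; omega, ?_⟩
      rwa [List.getD_eq_getElem?_getD, List.getElem?_append_left hk, ← List.getD_eq_getElem?_getD]
    · obtain ⟨p, hp, q, hq, rfl⟩ := (mem_diffsB b d).mp hd
      refine ⟨p, hp, q, hq, ms.length, by simp, ?_⟩
      simp
  · rintro ⟨p, hp, q, hq, k, hk, he⟩
    simp only [List.length_append, List.length_singleton] at hk
    by_cases hkl : k < ms.length
    · left
      exact (hI x).mpr ⟨p, hp, q, hq, k, hkl, by
        rwa [List.getD_eq_getElem?_getD, List.getElem?_append_left hkl, ← List.getD_eq_getElem?_getD] at he⟩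
    · right
      have hk' : k = ms.length := by omega
      subst hk'
      refine ⟨p - q, (mem_diffsB b _).mpr ⟨p, hp, q, hq, rfl⟩, ?_⟩
      simpa using he

theorem loop_eq (b : List Int) : ∀ (n : Nat) (ms : List Int) (forb : PySem.Set Int),
    ForbInv b ms forb →
    loopB (diffsB b) n ms forb (ms.foldl (fun m i => orBit m i) 0) =
      (loopA b n ms, (loopA b n ms).foldl (fun m i => orBit m i) 0)
  | 0, ms, forb, _ => by simp [loopA, loopB]
  | n + 1, ms, forb, hI => by
    rw [loopA, loopB]
    have hmt : whileB forb 0 = whileA b ms ms.length 0 := (whileAB_eq b ms forb hI 0).symm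
    rw [hmt]
    have := loop_eq b n (ms ++ [whileA b ms ms.length 0])
      ((diffsB b).foldl (fun f d => f.add (d + whileA b ms ms.length 0)) forb)
      (ForbInv_step b ms forb _ hI)
    rw [List.foldl_append] at this
    simp only [List.foldl_cons, List.foldl_nil] at this
    exact this

theorem ForbInv_nil (b : List Int) : ForbInv b [] PySem.Set.empty := by
  intro x
  simp [PySem.Set.empty]

-- ===== VERDICT (by name: the statement is the Claim_ definition above) =====
theorem getConst_spec : Claim_equal_getConst := by
  intro b _
  unfold Spec_getConst getConst getConst_alt
  exact (loop_eq b b.length [] PySem.Set.empty (ForbInv_nil b)).symm
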